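-- pv_equiv track=rewrite | github.com/bpbwaite/BlossomGameSolver | main.py | peakBonusLetter
-- ===== SOURCE A (Python) =====
-- def peakBonusLetter(word: str, centerLetter: str):
--     # return letters with most occurences
--     most = ('.', 0) # may break on strings that are all one letter
--     for char in word:
--         if char != centerLetter:
--             num = word.count(char)
--             if num > most[1]:
--                 most = (char, num)
--             elif num == most[1]:
--                 most = (most[0] + char, num) # multiple candidates
--     return ''.join(sorted(list(set(most[0]))))
-- ===== SOURCE B (Python) =====
-- def _groups(s):
--     # run-length encode an already-sorted list of characters
--     groups = []
--     for ch in s: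
--         if groups and groups[-1][0] == ch:
--             groups[-1] = (ch, groups[-1][1] + 1)
--         else:
--             groups.append((ch, 1))
--     return groups
--
--
-- def peakBonusLetter(word, centerLetter):
--     best = 0
--     letters = []
--     for ch, cnt in _groups(sorted(word)):
--         if ch != centerLetter:
--             if cnt > best:
--                 best = cnt
--                 letters = [ch]
--             elif cnt == best:
--                 letters.append(ch)
--     return ''.join(letters) if letters else '.'
-- ===== Notes on version B (the rewrite author's own statement) =====
-- stated objective: faster
-- what changed: Replaces A's per-character word.count rescans and string-concatenation accumulator with a single sort followed by one run-length pass over the sorted characters that tracks the maximal count and the letters attaining it.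
import Mathlib
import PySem

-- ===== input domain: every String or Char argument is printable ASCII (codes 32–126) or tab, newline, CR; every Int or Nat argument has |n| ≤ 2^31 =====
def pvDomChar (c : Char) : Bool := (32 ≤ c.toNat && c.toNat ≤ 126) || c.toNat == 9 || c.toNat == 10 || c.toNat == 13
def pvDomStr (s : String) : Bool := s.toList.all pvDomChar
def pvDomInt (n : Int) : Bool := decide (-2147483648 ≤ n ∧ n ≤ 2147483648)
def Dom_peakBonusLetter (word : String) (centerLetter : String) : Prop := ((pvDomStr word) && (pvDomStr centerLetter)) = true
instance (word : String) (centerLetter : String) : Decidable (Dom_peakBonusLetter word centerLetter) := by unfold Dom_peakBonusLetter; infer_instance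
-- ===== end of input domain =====

-- B replaces A's per-character word.count rescans with one sort + run-length pass (asymptotically faster).

-- ===== PORT A =====
-- A's loop body. The Python str accumulator most[0] is carried as a List Char ("." = ['.']):
-- str concatenation most[0] + char is exactly list append on the code points.
def pvStepA (w : List Char) (centerLetter : String) (most : List Char × Int) (char : Char) : List Char × Int :=
  if String.ofList [char] ≠ centerLetter then
    let num : Int := (w.count char : Int)   -- word.count(char): 1-character needle, = character count (exact)
    if num > most.2 then ([char], num)
    else if num = most.2 then (most.1 ++ [char], num)
    else most
  else most

def peakBonusLetter (word : String) (centerLetter : String) : String :=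
  let most := word.toList.foldl (pvStepA word.toList centerLetter) (['.'], 0)
  String.ofList (PySem.List.sorted (PySem.Set.ofList most.1) (fun c => c) false)

-- ===== PORT B =====
-- Source B's _groups loop body: groups[-1] is the head of the reversed accumulator
def pvGroupsStep (acc : List (Char × Int)) (ch : Char) : List (Char × Int) :=
  match acc with
  | (c, n) :: rest => if c = ch then (c, n + 1) :: rest else (ch, 1) :: (c, n) :: rest
  | [] => [(ch, 1)]

def pvGroups (s : List Char) : List (Char × Int) :=
  (s.foldl pvGroupsStep []).reverse

-- Source B's main loop body; state = (best, letters)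
def pvStepB (centerLetter : String) (st : Int × List Char) (g : Char × Int) : Int × List Char :=
  if String.ofList [g.1] ≠ centerLetter then
    if g.2 > st.1 then (g.2, [g.1])
    else if g.2 = st.1 then (st.1, st.2 ++ [g.1])
    else st
  else st

def peakBonusLetter_alt (word : String) (centerLetter : String) : String :=
  let r := (pvGroups (PySem.List.sorted word.toList (fun c => c) false)).foldl (pvStepB centerLetter) (0, [])
  if r.2.isEmpty then "." else String.ofList r.2

-- ===== PRECONDITION & SPEC =====
def Spec_peakBonusLetter (word : String) (centerLetter : String) (out : String) : Prop := out = peakBonusLetter_alt word centerLetter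
instance (word : String) (centerLetter : String) (out : String) : Decidable (Spec_peakBonusLetter word centerLetter out) := by unfold Spec_peakBonusLetter; infer_instance

-- ===== CLAIM (what is proved, stated in full; the proofs are below) =====
def Claim_equal_peakBonusLetter : Prop := ∀ (word : String) (centerLetter : String), Dom_peakBonusLetter word centerLetter → Spec_peakBonusLetter word centerLetter (peakBonusLetter word centerLetter)

-- ===== LEMMAS AND PROOFS =====

lemma pvA_inv (center : String) (w : List Char) (p : List Char) (hsub : ∀ c ∈ p, c ∈ w) :
    ((∀ c ∈ p, ¬ (String.ofList [c] ≠ center)) ∧ p.foldl (pvStepA w center) (['.'], 0) = (['.'], 0)) ∨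
    ((∃ c, c ∈ (p.foldl (pvStepA w center) (['.'], 0)).1) ∧
     (∀ c, c ∈ (p.foldl (pvStepA w center) (['.'], 0)).1 ↔
        (c ∈ p ∧ String.ofList [c] ≠ center ∧ (w.count c : Int) = (p.foldl (pvStepA w center) (['.'], 0)).2)) ∧
     (∀ c ∈ p, String.ofList [c] ≠ center → (w.count c : Int) ≤ (p.foldl (pvStepA w center) (['.'], 0)).2)) := by
  induction p using List.reverseRecOn with
  | nil => exact Or.inl ⟨by simp, rfl⟩
  | append_singleton q a ih =>
    have hsq : ∀ c ∈ q, c ∈ w := fun c hc => hsub c (by simp [hc])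
    have haw : a ∈ w := hsub a (by simp)
    have hca : (1 : Int) ≤ (w.count a : Int) := by
      have := List.count_pos_iff.mpr haw
      omega
    rw [List.foldl_concat]
    by_cases hk : String.ofList [a] = center
    · -- not kept: step is identity
      have hstep : ∀ m, pvStepA w center m a = m := by
        intro m; simp [pvStepA, hk]
      rw [hstep]
      rcases ih hsq with ⟨h1, h2⟩ | ⟨h1, h2, h3⟩
      · refine Or.inl ⟨?_, h2⟩
        intro c hc
        rcases List.mem_append.mp hc with hc | hc
        · exact h1 c hc
        · simp at hc; subst hc; simpa using hk
      · refine Or.inr ⟨h1, ?_, ?_⟩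
        · intro c; rw [h2 c]
          constructor
          · rintro ⟨hc, hkc, hcnt⟩; exact ⟨by simp [hc], hkc, hcnt⟩
          · rintro ⟨hc, hkc, hcnt⟩
            rcases List.mem_append.mp hc with hc | hc
            · exact ⟨hc, hkc, hcnt⟩
            · simp at hc; subst hc; exact absurd hk hkc
        · intro c hc hkc
          rcases List.mem_append.mp hc with hc | hc
          · exact h3 c hc hkc
          · simp at hc; subst hc; exact absurd hk hkc
    · -- kept
      rcases ih hsq with ⟨h1, h2⟩ | ⟨h1, h2, h3⟩
      · -- previously nothing kept; num > 0
        rw [h2]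
        have : pvStepA w center (['.'], 0) a = ([a], (w.count a : Int)) := by
          simp only [pvStepA, if_pos (Ne.intro hk)]
          rw [if_pos (by omega : ((w.count a : Nat) : Int) > 0)]
        rw [this]
        refine Or.inr ⟨⟨a, by simp⟩, ?_, ?_⟩
        · intro c
          constructor
          · intro hc; simp at hc; subst hc
            exact ⟨by simp, hk, rfl⟩
          · rintro ⟨hc, hkc, hcnt⟩
            rcases List.mem_append.mp hc with hc | hc
            · exact absurd hkc (by simpa using h1 c hc)
            · simpa using hc
        · intro c hc hkc
          rcases List.mem_append.mp hc with hc | hc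
          · exact absurd hkc (by simpa using h1 c hc)
          · simp at hc; subst hc; simp
      · -- previously some kept; set r := foldl …
        set r := q.foldl (pvStepA w center) (['.'], 0) with hr
        have hstep : pvStepA w center r a =
            if (w.count a : Int) > r.2 then ([a], (w.count a : Int))
            else if (w.count a : Int) = r.2 then (r.1 ++ [a], (w.count a : Int))
            else r := by
          simp [pvStepA, hk]
        rcases lt_trichotomy ((w.count a : Int)) r.2 with hlt | heq | hgt
        · rw [hstep, if_neg (by omega), if_neg (by omega)]
          refine Or.inr ⟨h1, ?_, ?_⟩
          · intro c; rw [h2 c]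
            constructor
            · rintro ⟨hc, hkc, hcnt⟩; exact ⟨by simp [hc], hkc, hcnt⟩
            · rintro ⟨hc, hkc, hcnt⟩
              rcases List.mem_append.mp hc with hc | hc
              · exact ⟨hc, hkc, hcnt⟩
              · simp at hc; subst hc; omega
          · intro c hc hkc
            rcases List.mem_append.mp hc with hc | hc
            · exact h3 c hc hkc
            · simp at hc; subst hc; omega
        · rw [hstep, if_neg (by omega), if_pos heq]
          refine Or.inr ⟨⟨a, by simp⟩, ?_, ?_⟩
          · intro c
            constructor
            · intro hc
              rcases List.mem_append.mp hc with hc | hc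
              · rcases (h2 c).mp hc with ⟨hc1, hc2, hc3⟩
                exact ⟨List.mem_append.mpr (Or.inl hc1), hc2, hc3.trans heq.symm⟩
              · simp at hc; subst hc
                exact ⟨List.mem_append.mpr (Or.inr (by simp)), hk, rfl⟩
            · rintro ⟨hc, hkc, hcnt⟩
              rcases List.mem_append.mp hc with hc | hc
              · exact List.mem_append.mpr (Or.inl ((h2 c).mpr ⟨hc, hkc, hcnt.trans heq⟩))
              · simp at hc; subst hc; exact List.mem_append.mpr (Or.inr (by simp))
          · intro c hc hkc
            rcases List.mem_append.mp hc with hc | hc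
            · have := h3 c hc hkc; omega
            · simp at hc; subst hc; simp
        · rw [hstep, if_pos (by omega)]
          refine Or.inr ⟨⟨a, by simp⟩, ?_, ?_⟩
          · intro c
            constructor
            · intro hc
              simp at hc; subst hc
              exact ⟨List.mem_append.mpr (Or.inr (by simp)), hk, rfl⟩
            · rintro ⟨hc, hkc, hcnt⟩
              rcases List.mem_append.mp hc with hc | hc
              · have := h3 c hc hkc; omega
              · simpa using hc
          · intro c hc hkc
            rcases List.mem_append.mp hc with hc | hc
            · have := h3 c hc hkc; omega
            · simp at hc; subst hc; simp

lemma pvG_acc_inv (s : List Char) (hs : s.Pairwise (· ≤ ·)) :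
    ((s.foldl pvGroupsStep []).map Prod.fst).Pairwise (fun a b => b < a) ∧
    (∀ c, c ∈ (s.foldl pvGroupsStep []).map Prod.fst ↔ c ∈ s) ∧
    (∀ g ∈ s.foldl pvGroupsStep [], g.2 = (s.count g.1 : Int)) ∧
    (∀ g, (s.foldl pvGroupsStep []).head? = some g → ∀ x ∈ s, x ≤ g.1) := by
  induction s using List.reverseRecOn with
  | nil => exact ⟨by simp, by simp, by simp, by simp⟩
  | append_singleton q a ih =>
    have hq : q.Pairwise (· ≤ ·) := (List.pairwise_append.mp hs).1
    have hqa : ∀ x ∈ q, x ≤ a := by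
      have := (List.pairwise_append.mp hs).2.2
      intro x hx; exact this x hx a (by simp)
    obtain ⟨i1, i2, i3, i4⟩ := ih hq
    rw [List.foldl_concat]
    rcases hacc : q.foldl pvGroupsStep [] with _ | ⟨⟨c, n⟩, rest⟩
    · -- acc empty → q empty
      have hqnil : q = [] := by
        rcases q with _ | ⟨x, q'⟩
        · rfl
        · exfalso
          have : x ∈ ([] : List (Char × Int)).map Prod.fst := by
            rw [← hacc]; exact (i2 x).mpr (by simp)
          simp at this
      subst hqnil
      refine ⟨by simp [pvGroupsStep], by simp [pvGroupsStep], ?_, ?_⟩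
      · intro g hg; simp [pvGroupsStep] at hg; subst hg; simp
      · intro g hg x hx
        simp [pvGroupsStep] at hg hx; subst hg; simp [hx]
    · rw [hacc] at i1 i2 i3 i4
      have hhead : ∀ x ∈ q, x ≤ c := i4 (c, n) rfl
      by_cases hca : c = a
      · subst hca
        have hstep : pvGroupsStep ((c, n) :: rest) c = (c, n + 1) :: rest := by
          simp [pvGroupsStep]
        rw [hstep]
        have hkeysne : ∀ k ∈ rest.map Prod.fst, k ≠ c := by
          intro k hk
          have := List.pairwise_cons.mp i1
          exact fun he => absurd (this.1 k (by simpa using hk)) (by simp [he])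
        refine ⟨by simpa using i1, ?_, ?_, ?_⟩
        · intro x
          constructor
          · intro hx; exact List.mem_append.mpr (Or.inl ((i2 x).mp hx))
          · intro hx
            rcases List.mem_append.mp hx with hx | hx
            · exact (i2 x).mpr hx
            · simp at hx; subst hx; simp
        · intro g hg
          rcases List.mem_cons.mp hg with hg | hg
          · subst hg
            have := i3 (c, n) (by simp)
            simp only at this ⊢
            rw [List.count_append]
            simp [this]
          · have h1 := i3 g (by simp [hg])
            have hne : g.1 ≠ c := hkeysne g.1 (List.mem_map.mpr ⟨g, hg, rfl⟩)
            have h0 : List.count g.1 [c] = 0 := List.count_eq_zero.mpr (by simp [hne])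
            rw [List.count_append, h0, h1]
            simp
        · intro g hg x hx
          rw [List.head?_cons, Option.some.injEq] at hg
          subst hg
          rcases List.mem_append.mp hx with hx | hx
          · exact hhead x hx
          · simp at hx; subst hx; exact le_refl _
      · -- new group; a ∉ q
        have hanq : a ∉ q := by
          intro ha
          exact hca (le_antisymm (hqa c ((i2 c).mp (by simp))) (hhead a ha))
        have hstep : pvGroupsStep ((c, n) :: rest) a = (a, 1) :: (c, n) :: rest := by
          simp [pvGroupsStep, hca]
        rw [hstep]
        have hklt : ∀ k ∈ ((c, n) :: rest).map Prod.fst, k < a := by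
          intro k hk
          have hkq : k ∈ q := (i2 k).mp hk
          have hle : k ≤ a := hqa k hkq
          rcases lt_or_eq_of_le hle with h | h
          · exact h
          · subst h; exact absurd hkq hanq
        refine ⟨?_, ?_, ?_, ?_⟩
        · rw [List.map_cons, List.pairwise_cons]
          exact ⟨fun k hk => hklt k hk, i1⟩
        · intro x
          simp only [List.map_cons, List.mem_cons, List.mem_append]
          constructor
          · rintro (hx | hx)
            · subst hx; simp
            · exact Or.inl ((i2 x).mp (by simpa using hx))
          · rintro (hx | hx)
            · exact Or.inr (by simpa using (i2 x).mpr hx)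
            · simp at hx; subst hx; exact Or.inl rfl
        · intro g hg
          rcases List.mem_cons.mp hg with hg | hg
          · subst hg
            simp only
            rw [List.count_append]
            have : a ∉ q := hanq
            simp [List.count_eq_zero_of_not_mem this]
          · have h1 := i3 g hg
            have hne : g.1 ≠ a := ne_of_lt (hklt g.1 (List.mem_map.mpr ⟨g, hg, rfl⟩))
            have h0 : List.count g.1 [a] = 0 := List.count_eq_zero.mpr (by simp [hne])
            rw [List.count_append, h0, h1]
            simp
        · intro g hg x hx
          rw [List.head?_cons, Option.some.injEq] at hg
          subst hg
          rcases List.mem_append.mp hx with hx | hx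
          · exact hqa x hx
          · simp at hx; subst hx; exact le_refl _

lemma pvB_inv (center : String) (g : List (Char × Int))
    (hkeys : (g.map Prod.fst).Pairwise (· < ·)) (hpos : ∀ q ∈ g, 1 ≤ q.2) :
    ((∀ q ∈ g, ¬ (String.ofList [q.1] ≠ center)) ∧ g.foldl (pvStepB center) (0, []) = (0, [])) ∨
    ((g.foldl (pvStepB center) (0, [])).2 ≠ [] ∧
     (∀ c, c ∈ (g.foldl (pvStepB center) (0, [])).2 ↔
        (∃ q ∈ g, q.1 = c ∧ String.ofList [c] ≠ center ∧ q.2 = (g.foldl (pvStepB center) (0, [])).1)) ∧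
     (∀ q ∈ g, String.ofList [q.1] ≠ center → q.2 ≤ (g.foldl (pvStepB center) (0, [])).1) ∧
     (g.foldl (pvStepB center) (0, [])).2.Pairwise (· < ·)) := by
  induction g using List.reverseRecOn with
  | nil => exact Or.inl ⟨by simp, rfl⟩
  | append_singleton h a ih =>
    have hkh : (h.map Prod.fst).Pairwise (· < ·) := by
      rw [List.map_append] at hkeys
      exact (List.pairwise_append.mp hkeys).1
    have hlt : ∀ q ∈ h, q.1 < a.1 := by
      rw [List.map_append] at hkeys
      intro q hq
      exact (List.pairwise_append.mp hkeys).2.2 q.1 (List.mem_map.mpr ⟨q, hq, rfl⟩) a.1 (by simp)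
    have hposh : ∀ q ∈ h, 1 ≤ q.2 := fun q hq => hpos q (by simp [hq])
    have hposa : 1 ≤ a.2 := hpos a (by simp)
    rw [List.foldl_concat]
    by_cases hk : String.ofList [a.1] = center
    · have hstep : ∀ st, pvStepB center st a = st := fun st => by simp [pvStepB, hk]
      rw [hstep]
      rcases ih hkh hposh with ⟨i1, i2⟩ | ⟨i1, i2, i3, i4⟩
      · refine Or.inl ⟨?_, i2⟩
        intro q hq
        rcases List.mem_append.mp hq with hq | hq
        · exact i1 q hq
        · simp at hq; subst hq; simpa using hk
      · refine Or.inr ⟨i1, ?_, ?_, i4⟩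
        · intro c; rw [i2 c]
          constructor
          · rintro ⟨q, hq, h1, h2, h3⟩; exact ⟨q, by simp [hq], h1, h2, h3⟩
          · rintro ⟨q, hq, h1, h2, h3⟩
            rcases List.mem_append.mp hq with hq | hq
            · exact ⟨q, hq, h1, h2, h3⟩
            · simp at hq; subst hq; subst h1; exact absurd hk h2
        · intro q hq hkq
          rcases List.mem_append.mp hq with hq | hq
          · exact i3 q hq hkq
          · simp at hq; subst hq; exact absurd hk hkq
    · rcases ih hkh hposh with ⟨i1, i2⟩ | ⟨i1, i2, i3, i4⟩
      · rw [i2]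
        have hstep : pvStepB center (0, []) a = (a.2, [a.1]) := by
          simp only [pvStepB, if_pos (Ne.intro hk)]
          rw [if_pos (by omega : a.2 > (0:Int))]
        rw [hstep]
        refine Or.inr ⟨by simp, ?_, ?_, by simp⟩
        · intro c
          constructor
          · intro hc; simp at hc; subst hc
            exact ⟨a, by simp, rfl, hk, rfl⟩
          · rintro ⟨q, hq, h1, h2, h3⟩
            rcases List.mem_append.mp hq with hq | hq
            · exact absurd h2 (by subst h1; simpa using i1 q hq)
            · simp at hq; subst hq; simp [h1]
        · intro q hq hkq
          rcases List.mem_append.mp hq with hq | hq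
          · exact absurd hkq (by simpa using i1 q hq)
          · simp at hq; subst hq; simp
      · set r := h.foldl (pvStepB center) (0, []) with hr
        have hstep : pvStepB center r a =
            if a.2 > r.1 then (a.2, [a.1])
            else if a.2 = r.1 then (r.1, r.2 ++ [a.1]) else r := by
          simp [pvStepB, hk]
        have hmemlt : ∀ c ∈ r.2, c < a.1 := by
          intro c hc
          rcases (i2 c).mp hc with ⟨q, hq, h1, _, _⟩
          rw [← h1]; exact hlt q hq
        rcases lt_trichotomy a.2 r.1 with hl | he | hg
        · rw [hstep, if_neg (by omega), if_neg (by omega)]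
          refine Or.inr ⟨i1, ?_, ?_, i4⟩
          · intro c; rw [i2 c]
            constructor
            · rintro ⟨q, hq, h1, h2, h3⟩; exact ⟨q, by simp [hq], h1, h2, h3⟩
            · rintro ⟨q, hq, h1, h2, h3⟩
              rcases List.mem_append.mp hq with hq | hq
              · exact ⟨q, hq, h1, h2, h3⟩
              · simp at hq; subst hq; omega
          · intro q hq hkq
            rcases List.mem_append.mp hq with hq | hq
            · exact i3 q hq hkq
            · simp at hq; subst hq; omega
        · rw [hstep, if_neg (by omega), if_pos he]
          refine Or.inr ⟨by simp, ?_, ?_, ?_⟩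
          · intro c
            constructor
            · intro hc
              rcases List.mem_append.mp hc with hc | hc
              · rcases (i2 c).mp hc with ⟨q, hq, h1, h2, h3⟩
                exact ⟨q, by simp [hq], h1, h2, h3⟩
              · simp at hc; subst hc
                exact ⟨a, by simp, rfl, hk, he⟩
            · rintro ⟨q, hq, h1, h2, h3⟩
              rcases List.mem_append.mp hq with hq | hq
              · exact List.mem_append.mpr (Or.inl ((i2 c).mpr ⟨q, hq, h1, h2, h3⟩))
              · simp at hq; subst hq; subst h1; exact List.mem_append.mpr (Or.inr (by simp))
          · intro q hq hkq
            rcases List.mem_append.mp hq with hq | hq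
            · exact i3 q hq hkq
            · simp at hq; subst hq; omega
          · rw [List.pairwise_append]
            exact ⟨i4, by simp, fun x hx y hy => by simp at hy; subst hy; exact hmemlt x hx⟩
        · rw [hstep, if_pos (by omega)]
          refine Or.inr ⟨by simp, ?_, ?_, by simp⟩
          · intro c
            constructor
            · intro hc; simp at hc; subst hc
              exact ⟨a, by simp, rfl, hk, rfl⟩
            · rintro ⟨q, hq, h1, h2, h3⟩
              rcases List.mem_append.mp hq with hq | hq
              · have := i3 q hq (by rw [h1]; exact h2)
                simp at h3; omega
              · simp at hq; subst hq; simp [h1]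
          · intro q hq hkq
            rcases List.mem_append.mp hq with hq | hq
            · have := i3 q hq hkq; simp; omega
            · simp at hq; subst hq; simp

-- ===== VERDICT (by name: the statement is the Claim_ definition above) =====
theorem peakBonusLetter_spec : Claim_equal_peakBonusLetter := by
  intro word center _
  unfold Spec_peakBonusLetter peakBonusLetter peakBonusLetter_alt
  simp only []
  set w := word.toList with hw
  set s := PySem.List.sorted w (fun c => c) false with hs
  have hperm : s.Perm w := PySem.List.sorted_perm w (fun c => c) false
  have hpair : s.Pairwise (· ≤ ·) := by
    simpa using PySem.List.sorted_pairwise (xs := w) (key := fun c => c)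
  obtain ⟨g1, g2, g3, g4⟩ := pvG_acc_inv s hpair
  set acc := s.foldl pvGroupsStep [] with hacc
  have hgrp : pvGroups s = acc.reverse := rfl
  have hkeys : ((pvGroups s).map Prod.fst).Pairwise (· < ·) := by
    rw [hgrp, List.map_reverse, List.pairwise_reverse]
    exact g1
  have hkeymem : ∀ c, c ∈ (pvGroups s).map Prod.fst ↔ c ∈ w := by
    intro c
    rw [hgrp, List.map_reverse, List.mem_reverse, g2 c, hperm.mem_iff]
  have hcount : ∀ g ∈ pvGroups s, g.2 = (w.count g.1 : Int) := by
    intro g hg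
    rw [hgrp, List.mem_reverse] at hg
    rw [g3 g hg, hperm.count_eq]
  have hpos : ∀ g ∈ pvGroups s, 1 ≤ g.2 := by
    intro g hg
    rw [hcount g hg]
    have : g.1 ∈ w := (hkeymem g.1).mp (List.mem_map.mpr ⟨g, hg, rfl⟩)
    have := List.count_pos_iff.mpr this
    omega
  set rA := w.foldl (pvStepA w center) (['.'], 0) with hrA
  set rB := (pvGroups s).foldl (pvStepB center) (0, []) with hrB
  by_cases hkept : ∃ c ∈ w, String.ofList [c] ≠ center
  · obtain ⟨c0, hc0w, hc0k⟩ := hkept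
    rcases pvA_inv center w w (fun c hc => hc) with ⟨hA1, _⟩ | ⟨hA1, hA2, hA3⟩
    · exact absurd hc0k (hA1 c0 hc0w)
    rw [← hrA] at hA1 hA2 hA3
    rcases pvB_inv center (pvGroups s) hkeys hpos with ⟨hB1, _⟩ | ⟨hB1, hB2, hB3, hB4⟩
    · obtain ⟨q, hq, hq1⟩ := List.mem_map.mp ((hkeymem c0).mpr hc0w)
      exact absurd (by rw [hq1]; exact hc0k) (hB1 q hq)
    rw [← hrB] at hB1 hB2 hB3 hB4
    -- the two maxima agree
    have hMle : rA.2 ≤ rB.1 := by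
      obtain ⟨cA, hcA⟩ := hA1
      obtain ⟨hcAw, hcAk, hcAc⟩ := (hA2 cA).mp hcA
      obtain ⟨q, hq, hq1⟩ := List.mem_map.mp ((hkeymem cA).mpr hcAw)
      have h2 := hB3 q hq (by rw [hq1]; exact hcAk)
      have h3 := hcount q hq
      rw [hq1] at h3
      omega
    have hMge : rB.1 ≤ rA.2 := by
      obtain ⟨cB, hcB⟩ := List.exists_mem_of_ne_nil _ hB1
      obtain ⟨q, hq, hq1, hq2, hq3⟩ := (hB2 cB).mp hcB
      have h3 := hcount q hq
      have hmem : cB ∈ w := (hkeymem cB).mp (List.mem_map.mpr ⟨q, hq, hq1⟩)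
      have h4 := hA3 cB hmem hq2
      rw [hq1] at h3
      omega
    have hM : rA.2 = rB.1 := le_antisymm hMle hMge
    -- the two letter lists hold the same characters
    have hsame : ∀ c, c ∈ rB.2 ↔ c ∈ rA.1 := by
      intro c
      rw [hB2 c, hA2 c]
      constructor
      · rintro ⟨q, hq, hq1, hq2, hq3⟩
        have hcw : c ∈ w := (hkeymem c).mp (List.mem_map.mpr ⟨q, hq, hq1⟩)
        have h3 := hcount q hq
        rw [hq1] at h3
        exact ⟨hcw, hq2, by omega⟩
      · rintro ⟨hcw, hck, hcc⟩
        obtain ⟨q, hq, hq1⟩ := List.mem_map.mp ((hkeymem c).mpr hcw)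
        have h3 := hcount q hq
        rw [hq1] at h3
        exact ⟨q, hq, hq1, hck, by omega⟩
    have hnodupB : rB.2.Nodup := hB4.imp ne_of_lt
    have hpermF : rB.2.Perm (PySem.Set.ofList rA.1) := by
      refine (List.perm_ext_iff_of_nodup hnodupB (PySem.Set.nodup_ofList rA.1)).mpr ?_
      intro c
      rw [PySem.Set.mem_ofList]
      exact hsame c
    have hsorted : PySem.List.sorted (PySem.Set.ofList rA.1) (fun c => c) false = rB.2 :=
      PySem.List.sorted_eq_of_perm_of_pairwise_lt _ _ _ hpermF (by simpa using hB4)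
    rw [hsorted]
    have hne : rB.2.isEmpty = false := by
      rw [List.isEmpty_eq_false_iff]
      exact hB1
    rw [hne]
    simp
  · -- no non-center letter anywhere
    have hkept' : ∀ c ∈ w, String.ofList [c] = center := by
      intro c hc
      by_contra hne
      exact hkept ⟨c, hc, hne⟩
    rcases pvA_inv center w w (fun c hc => hc) with ⟨_, hA2⟩ | ⟨hA1, hA2, _⟩
    · rcases pvB_inv center (pvGroups s) hkeys hpos with ⟨_, hB2⟩ | ⟨hB1, hB2, _, _⟩
      · rw [← hrA] at hA2
        rw [← hrB] at hB2
        rw [hA2, hB2]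
        decide
      · obtain ⟨cB, hcB⟩ := List.exists_mem_of_ne_nil _ hB1
        obtain ⟨q, hq, hq1, hq2, _⟩ := (hB2 cB).mp hcB
        have hmem : cB ∈ w := (hkeymem cB).mp (List.mem_map.mpr ⟨q, hq, hq1⟩)
        exact absurd (hkept' cB hmem) (by simpa using hq2)
    · obtain ⟨cA, hcA⟩ := hA1
      obtain ⟨hcAw, hcAk, _⟩ := (hA2 cA).mp hcA
      exact absurd (hkept' cA hcAw) (by simpa using hcAk)
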